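-- pv_equiv track=rewrite | github.com/zlw241/foobar | gridZero.py | toggle_even
-- ===== SOURCE A (Python) =====
-- def toggle_even(grid):
--     points = []
--     for i in range(len(grid)):
--         if 1 in grid[i]:
--             for j in range(len(grid[i])):
--                 if grid[i][j] == 1:
--                     points.append([i,j])
--     for i in points:
--         row = i[0]
--         column = i[1]
--         for j in range(len(grid[row])):
--             if j != column:
--                 grid[row][j] += 1
--         for k in range(len(grid)):
--             if k != row:
--                 grid[k][column] += 1
--
--     total_moves = 0
--     for i in range(len(grid)):
--         grid[i] = [c%2 for c in grid[i]]
--         total_moves += sum(grid[i])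
--
--     return total_moves
-- ===== SOURCE B (Python) =====
-- # B: closed-form per-cell computation.  Each 1-cell at (r,c) adds 1 to every other
-- # cell of row r and column c, so cell (i,j) ends as
-- # (grid[i][j] + ones_in_row_i + ones_in_col_j - 2*[grid[i][j]==1]) and mod 2 the
-- # adjustment vanishes.  One counting pass + one summing pass.
-- # Note: unlike A, B does not mutate grid in place; only the return value is claimed equal.
-- def toggle_even(grid):
--     row_ones = [row.count(1) for row in grid]
--     col_ones = {}
--     for row in grid:
--         for j, v in enumerate(row):
--             if v == 1:
--                 col_ones[j] = col_ones.get(j, 0) + 1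
--     return sum((v + r + col_ones.get(j, 0)) % 2
--                for row, r in zip(grid, row_ones)
--                for j, v in enumerate(row))
-- ===== Notes on version B (the rewrite author's own statement) =====
-- stated objective: alternative
-- what changed: Replaced the per-1-cell row/column increment passes by precomputed per-row and per-column 1-counts, evaluating each cell as (v + rowcount + colcount) % 2 in a single closed-form pass.
import Mathlib
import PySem

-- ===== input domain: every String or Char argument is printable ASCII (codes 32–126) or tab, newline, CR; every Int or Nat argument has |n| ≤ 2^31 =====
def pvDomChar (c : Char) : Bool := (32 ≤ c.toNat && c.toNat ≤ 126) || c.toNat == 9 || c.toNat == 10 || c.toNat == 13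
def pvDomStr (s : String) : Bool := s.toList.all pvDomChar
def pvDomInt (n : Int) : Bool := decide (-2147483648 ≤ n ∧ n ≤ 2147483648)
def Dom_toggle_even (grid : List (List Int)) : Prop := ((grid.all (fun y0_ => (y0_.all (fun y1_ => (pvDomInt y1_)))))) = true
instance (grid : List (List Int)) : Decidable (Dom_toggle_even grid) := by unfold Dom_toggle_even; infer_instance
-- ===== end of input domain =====

-- B replaces A's per-1-cell row/column increment passes by precomputed per-row and
-- per-column 1-counts evaluated in one closed-form pass (objective: alternative).
-- A mutates its argument in place; B does not — the claim is about the return value only.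

-- ===== PORT A =====
def toggle_even (grid : List (List Int)) : Int :=
  let points : List (Nat × Nat) :=
    (List.range grid.length).foldl (fun acc i =>
      if (1 : Int) ∈ grid.getD i [] then
        (List.range (grid.getD i []).length).foldl (fun acc2 j =>
          if (grid.getD i []).getD j 0 = 1 then acc2 ++ [(i, j)] else acc2) acc
      else acc) []
  let grid2 :=
    points.foldl (fun g p =>
      (g.modify p.1 (fun r => r.mapIdx (fun j v => if j ≠ p.2 then v + 1 else v))).mapIdx
        (fun k r => if k ≠ p.1 then r.modify p.2 (· + 1) else r)) grid
  grid2.foldl (fun t r => t + (r.map (fun c => PySem.Int.mod c 2)).sum) 0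

-- ===== PORT B =====
def toggle_even_alt (grid : List (List Int)) : Int :=
  let row_ones : List Int := grid.map (fun row => (PySem.List.count row 1 : Int))
  let col_ones : PySem.Dict Int Int :=
    grid.foldl (fun d row =>
      (PySem.List.enumerate row).foldl (fun d2 jv =>
        if jv.2 = 1 then d2.modify jv.1 0 (· + 1) else d2) d) PySem.Dict.empty
  ((grid.zip row_ones).map (fun rr =>
    ((PySem.List.enumerate rr.1).map (fun jv =>
      PySem.Int.mod (jv.2 + rr.2 + col_ones.getD jv.1 0) 2)).sum)).sum

-- ===== PRECONDITION & SPEC =====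
-- Pre_ excludes exactly the inputs on which A raises IndexError: those with a 1-cell whose
-- column index is out of range for some shorter row.
def Pre_toggle_even (grid : List (List Int)) : Prop :=
  ∀ r' ∈ grid, ∀ j ∈ List.range r'.length, r'.getD j 0 = 1 → ∀ r ∈ grid, j < r.length
instance (grid : List (List Int)) : Decidable (Pre_toggle_even grid) := by
  unfold Pre_toggle_even; infer_instance
def pvWitness_toggle_even : List (List Int) := [[1, 0], [0, 1]]

def Spec_toggle_even (grid : List (List Int)) (out : Int) : Prop := out = toggle_even_alt grid
instance (grid : List (List Int)) (out : Int) : Decidable (Spec_toggle_even grid out) := by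
  unfold Spec_toggle_even; infer_instance

-- ===== CLAIM (what is proved, stated in full; the proofs are below) =====
def Claim_equal_toggle_even : Prop := ∀ (grid : List (List Int)), Dom_toggle_even grid → Pre_toggle_even grid → Spec_toggle_even grid (toggle_even grid)

-- ===== LEMMAS AND PROOFS =====
theorem pvMapRangeGetD {α : Type} (d : α) (l : List α) :
    (List.range l.length).map (fun i => l.getD i d) = l := by
  apply List.ext_getElem
  · simp
  · intro i h1 h2
    simp [List.getD_eq_getElem?_getD, List.getElem?_eq_getElem h2]

theorem pvCountPRangeSingle (n j : Nat) (p : Nat → Bool) :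
    (List.range n).countP (fun x => p x && decide (x = j)) = if j < n ∧ p j then 1 else 0 := by
  induction n with
  | zero => simp
  | succ n ih =>
    rw [List.range_succ, List.countP_append, ih]
    by_cases hjn : j < n <;> by_cases hpj : p j <;> by_cases hj : n = j <;>
      simp [List.countP_cons, hjn, hpj, hj] <;> first | omega | (subst hj; simp_all) | simp_all

theorem pvSumRangeDiffSingle (n i : Nat) (f g : Nat → Int) (hi : i < n)
    (h : ∀ k < n, k ≠ i → f k = g k) :
    ((List.range n).map f).sum = ((List.range n).map g).sum + f i - g i := by
  induction n with
  | zero => omega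
  | succ n ih =>
    rw [List.range_succ, List.map_append, List.map_append, List.sum_append, List.sum_append]
    by_cases hni : i = n
    · have heq : (List.range n).map f = (List.range n).map g := by
        apply List.map_congr_left
        intro k hk
        exact h k (by simp at hk; omega) (by simp at hk; omega)
      rw [heq, hni]; simp; ring
    · have hn : f n = g n := h n (by omega) (fun e => hni e.symm)
      rw [ih (by omega) (fun k hk hki => h k (by omega) hki)]
      simp [hn]; ring

def pvStep (g : List (List Int)) (p : Nat × Nat) : List (List Int) :=
  (g.modify p.1 (fun r => r.mapIdx (fun j v => if j ≠ p.2 then v + 1 else v))).mapIdx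
    (fun k r => if k ≠ p.1 then r.modify p.2 (· + 1) else r)

def pvE (g : List (List Int)) (i j : Nat) : Int := (g.getD i []).getD j 0

theorem pvStepLen (g : List (List Int)) (p : Nat × Nat) : (pvStep g p).length = g.length := by
  simp [pvStep]

theorem pvStepRowLen (g : List (List Int)) (p : Nat × Nat) (k : Nat) :
    ((pvStep g p).getD k []).length = ((g.getD k []).length) := by
  simp only [pvStep, List.getD_eq_getElem?_getD, List.getElem?_mapIdx, List.getElem?_modify]
  cases h : g[k]? with
  | none => simp
  | some r => split_ifs <;> simp_all

theorem pvStepRow (g : List (List Int)) (r c i : Nat) (hi : i < g.length) :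
    (pvStep g (r, c)).getD i [] =
      if i = r then ((g.getD i []).mapIdx (fun j v => if j ≠ c then v + 1 else v))
      else ((g.getD i []).modify c (· + 1)) := by
  have hgi : g[i]? = some (g.getD i []) := by
    cases h : g[i]? with
    | none => exact absurd (List.getElem?_eq_none_iff.mp h) (by omega)
    | some row => rw [List.getD_eq_getElem?_getD, h]; rfl
  rw [List.getD_eq_getElem?_getD]
  simp only [pvStep, List.getElem?_mapIdx, List.getElem?_modify, hgi]
  by_cases hir : i = r
  · subst hir; simp
  · simp [hir, Ne.symm hir]

theorem pvStepEntry (g : List (List Int)) (r c i j : Nat)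
    (hi : i < g.length) (hj : j < (g.getD i []).length)
    (hc : i ≠ r → c < (g.getD i []).length) :
    pvE (pvStep g (r, c)) i j =
      pvE g i j + (if i = r then (if j = c then 0 else 1) else (if j = c then 1 else 0)) := by
  unfold pvE
  rw [pvStepRow g r c i hi]
  have hjget : (g.getD i [])[j]? = some ((g.getD i []).getD j 0) := by
    rw [List.getD_eq_getElem _ _ hj]
    exact List.getElem?_eq_getElem hj
  by_cases hir : i = r
  · subst hir
    rw [if_pos rfl, List.getD_eq_getElem?_getD, List.getElem?_mapIdx, hjget]
    by_cases hjc : j = c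
    · simp [hjc]
    · simp [hjc]
  · rw [if_neg hir, List.getD_eq_getElem?_getD, List.getElem?_modify, hjget]
    by_cases hjc : j = c
    · simp [hjc, hir]
    · simp [Ne.symm hjc, hjc, hir]

theorem pvFoldEntry (pts : List (Nat × Nat)) (g : List (List Int)) (i j : Nat)
    (hp : ∀ p ∈ pts, ∀ k < g.length, p.2 < (g.getD k []).length)
    (hi : i < g.length) (hj : j < (g.getD i []).length) :
    pvE (pts.foldl pvStep g) i j =
      pvE g i j + (pts.countP (fun p => decide (p.1 = i) && decide (p.2 ≠ j)) : Int)
                + (pts.countP (fun p => decide (p.1 ≠ i) && decide (p.2 = j)) : Int) := by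
  induction pts generalizing g with
  | nil => simp
  | cons p t ih =>
    obtain ⟨r, c⟩ := p
    rw [List.foldl_cons]
    have hstep : pvE (pvStep g (r, c)) i j =
        pvE g i j + (if i = r then (if j = c then 0 else 1) else (if j = c then 1 else 0)) :=
      pvStepEntry g r c i j hi hj (fun _ => hp (r, c) (by simp) i hi)
    have hp' : ∀ p ∈ t, ∀ k < (pvStep g (r, c)).length, p.2 < ((pvStep g (r, c)).getD k []).length := by
      intro p hpt k hk
      rw [pvStepRowLen]
      exact hp p (by simp [hpt]) k (by rwa [pvStepLen g (r, c)] at hk)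
    rw [ih (pvStep g (r, c)) hp' (by rwa [pvStepLen]) (by rwa [pvStepRowLen]), hstep]
    rw [List.countP_cons, List.countP_cons]
    by_cases h1 : r = i <;> by_cases h2 : c = j <;>
      simp [h1, h2, Ne.symm, eq_comm] <;> push_cast <;> ring

theorem pvFoldLen (pts : List (Nat × Nat)) (g : List (List Int)) :
    (pts.foldl pvStep g).length = g.length := by
  induction pts generalizing g with
  | nil => rfl
  | cons p t ih => rw [List.foldl_cons, ih, pvStepLen]

theorem pvFoldRowLen (pts : List (Nat × Nat)) (g : List (List Int)) (k : Nat) :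
    ((pts.foldl pvStep g).getD k []).length = ((g.getD k []).length) := by
  induction pts generalizing g with
  | nil => rfl
  | cons p t ih => rw [List.foldl_cons, ih, pvStepRowLen]

def pvPts (grid : List (List Int)) : List (Nat × Nat) :=
  (List.range grid.length).flatMap (fun i =>
    ((List.range (grid.getD i []).length).filter (fun j => (grid.getD i []).getD j 0 = 1)).map
      (fun j => (i, j)))

theorem pvPtsInner (row : List Int) (i : Nat) (L : List Nat) (acc : List (Nat × Nat)) :
    L.foldl (fun acc2 j => if row.getD j 0 = 1 then acc2 ++ [(i, j)] else acc2) acc =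
      acc ++ (L.filter (fun j => row.getD j 0 = 1)).map (fun j => (i, j)) := by
  induction L generalizing acc with
  | nil => simp
  | cons a L ih =>
    rw [List.foldl_cons, ih, List.filter_cons]
    by_cases h : row.getD a 0 = 1
    · rw [if_pos h, if_pos (by simpa using h), List.map_cons, List.append_assoc,
        List.singleton_append]
    · rw [if_neg h, if_neg (by simpa using h)]

theorem pvPtsEq (grid : List (List Int)) :
    (List.range grid.length).foldl (fun acc i =>
      if (1 : Int) ∈ grid.getD i [] then
        (List.range (grid.getD i []).length).foldl (fun acc2 j =>
          if (grid.getD i []).getD j 0 = 1 then acc2 ++ [(i, j)] else acc2) acc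
      else acc) [] = pvPts grid := by
  have key : ∀ (L : List Nat) (acc : List (Nat × Nat)),
      L.foldl (fun acc i =>
        if (1 : Int) ∈ grid.getD i [] then
          (List.range (grid.getD i []).length).foldl (fun acc2 j =>
            if (grid.getD i []).getD j 0 = 1 then acc2 ++ [(i, j)] else acc2) acc
        else acc) acc =
      acc ++ L.flatMap (fun i =>
        ((List.range (grid.getD i []).length).filter (fun j => (grid.getD i []).getD j 0 = 1)).map
          (fun j => (i, j))) := by
    intro L
    induction L with
    | nil => simp
    | cons a L ih =>
      intro acc
      rw [List.foldl_cons]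
      by_cases h : (1 : Int) ∈ grid.getD a []
      · rw [if_pos h, pvPtsInner, ih, List.flatMap_cons, List.append_assoc]
      · rw [if_neg h, ih, List.flatMap_cons]
        have : (List.range (grid.getD a []).length).filter
            (fun j => decide ((grid.getD a []).getD j 0 = 1)) = [] := by
          rw [List.filter_eq_nil_iff]
          intro j hj
          simp only [decide_eq_true_eq]
          intro heq
          apply h
          rw [← heq, List.getD_eq_getElem _ _ (List.mem_range.mp hj)]
          exact List.getElem_mem _
        rw [this]
        simp
  rw [key, List.nil_append]
  rfl

theorem pvMemPts (grid : List (List Int)) (p : Nat × Nat) :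
    p ∈ pvPts grid ↔
      p.1 < grid.length ∧ p.2 < (grid.getD p.1 []).length ∧ (grid.getD p.1 []).getD p.2 0 = 1 := by
  obtain ⟨a, b⟩ := p
  simp only [pvPts, List.mem_flatMap, List.mem_map, List.mem_filter, List.mem_range]
  constructor
  · rintro ⟨i, hi, j, ⟨hj, hj1⟩, he⟩
    obtain ⟨rfl, rfl⟩ : a = i ∧ b = j := by
      constructor <;> [exact (Prod.mk.injEq .. ▸ he).1.symm; exact (Prod.mk.injEq .. ▸ he).2.symm]
    exact ⟨hi, hj, by simpa using hj1⟩
  · rintro ⟨ha, hb, he⟩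
    exact ⟨a, ha, b, ⟨hb, by simpa using he⟩, rfl⟩

theorem pvAeq (grid : List (List Int)) (hpre : Pre_toggle_even grid) :
    toggle_even grid = ((List.range grid.length).map (fun i =>
      ((List.range ((grid.getD i []).length)).map (fun j =>
        PySem.Int.mod (pvE grid i j
          + ((pvPts grid).countP (fun p => decide (p.1 = i) && decide (p.2 ≠ j)) : Int)
          + ((pvPts grid).countP (fun p => decide (p.1 ≠ i) && decide (p.2 = j)) : Int)) 2)).sum)).sum := by
  unfold toggle_even
  rw [pvPtsEq]
  show ((pvPts grid).foldl pvStep grid).foldl (fun t r => t + (r.map (fun c => PySem.Int.mod c 2)).sum) 0 = _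
  simp only [PySem.List.foldl_add, zero_add]
  have hp : ∀ p ∈ pvPts grid, ∀ k < grid.length, p.2 < (grid.getD k []).length := by
    intro p hmem k hk
    obtain ⟨h1, h2, h3⟩ := (pvMemPts grid p).mp hmem
    have hrmem : grid.getD p.1 [] ∈ grid := by
      rw [List.getD_eq_getElem _ _ h1]; exact List.getElem_mem _
    exact hpre _ hrmem p.2 (List.mem_range.mpr h2) h3 _
      (by rw [List.getD_eq_getElem _ _ hk]; exact List.getElem_mem _)
  set g2 := (pvPts grid).foldl pvStep grid with hg2
  have hlen : g2.length = grid.length := pvFoldLen _ _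
  conv_lhs => rw [← pvMapRangeGetD ([] : List Int) g2, hlen]
  rw [List.map_map]
  apply congrArg
  apply List.map_congr_left
  intro i hi
  have hi' := List.mem_range.mp hi
  simp only [Function.comp]
  have hrl : (g2.getD i []).length = (grid.getD i []).length := pvFoldRowLen _ _ _
  conv_lhs => rw [← pvMapRangeGetD (0 : Int) (g2.getD i []), hrl, List.map_map]
  apply congrArg
  apply List.map_congr_left
  intro j hj
  have hj' := List.mem_range.mp hj
  simp only [Function.comp]
  rw [(by rfl : (g2.getD i []).getD j 0 = pvE g2 i j), hg2,
    pvFoldEntry (pvPts grid) grid i j hp hi' hj']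

def pvCol (grid : List (List Int)) (j : Nat) : Nat :=
  ((List.range grid.length).map (fun i' =>
    if j < (grid.getD i' []).length ∧ (grid.getD i' []).getD j 0 = 1 then 1 else 0)).sum

theorem pvCntNe (n j : Nat) (p : Nat → Bool) :
    ((List.range n).countP (fun x => decide (x ≠ j) && p x) : Int) =
      ((List.range n).countP p : Int) - (if j < n ∧ p j then 1 else 0) := by
  induction n with
  | zero => simp
  | succ n ih =>
    rw [List.range_succ, List.countP_append, List.countP_append]
    push_cast
    rw [ih]
    by_cases hjn : j < n <;> by_cases hpj : p j <;> by_cases hj : n = j <;>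
      simp [hjn, hpj, hj] <;> omega

theorem pvRangeCount (row : List Int) :
    (row.count 1 : Int) = (List.range row.length).countP (fun x => decide (row.getD x 0 = 1)) := by
  rw [List.count_eq_countP]
  conv_lhs => rw [← pvMapRangeGetD (0 : Int) row]
  rw [List.countP_map]
  norm_cast

theorem pvSumRangeSingleNat (n i : Nat) (f : Nat → Nat) (hi : i < n)
    (h : ∀ k < n, k ≠ i → f k = 0) : ((List.range n).map f).sum = f i := by
  induction n with
  | zero => omega
  | succ n ih =>
    rw [List.range_succ, List.map_append, List.sum_append]
    by_cases hni : i = n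
    · have : ∀ k ∈ List.range n, f k = 0 := fun k hk =>
        h k (by simp at hk; omega) (by simp at hk; omega)
      rw [List.map_congr_left this, hni]
      simp
    · rw [ih (by omega) (fun k hk hki => h k (by omega) hki)]
      simp [h n (by omega) (fun e => hni e.symm)]

theorem pvCnt1 (grid : List (List Int)) (i j : Nat)
    (hi : i < grid.length) (hj : j < (grid.getD i []).length) :
    (((pvPts grid).countP (fun p => decide (p.1 = i) && decide (p.2 ≠ j))) : Int) =
      ((grid.getD i []).count 1 : Int) -
        (if (grid.getD i []).getD j 0 = 1 then 1 else 0) := by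
  have h1 : (pvPts grid).countP (fun p => decide (p.1 = i) && decide (p.2 ≠ j)) =
      List.countP (fun x => decide (x ≠ j) && decide ((grid.getD i []).getD x 0 = 1))
        (List.range (grid.getD i []).length) := by
    rw [pvPts, List.countP_flatMap]
    rw [pvSumRangeSingleNat _ i _ hi (by
      intro k _ hk
      simp only [Function.comp, List.countP_map]
      exact List.countP_eq_zero.mpr (by intro a _; simp [hk]))]
    simp only [Function.comp, List.countP_map, List.countP_filter]
    apply List.countP_congr
    intro x _
    simp
  rw [h1, pvCntNe, ← pvRangeCount]
  simp only [hj, true_and, decide_eq_true_eq]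

theorem pvCnt2 (grid : List (List Int)) (i j : Nat)
    (hi : i < grid.length) (hj : j < (grid.getD i []).length) :
    (((pvPts grid).countP (fun p => decide (p.1 ≠ i) && decide (p.2 = j))) : Int) =
      (pvCol grid j : Int) - (if (grid.getD i []).getD j 0 = 1 then 1 else 0) := by
  rw [pvPts, List.countP_flatMap]
  push_cast [List.map_map]
  rw [pvSumRangeDiffSingle grid.length i _
    (fun k => (((if j < (grid.getD k []).length ∧ (grid.getD k []).getD j 0 = 1 then 1 else 0 : Nat)) : Int)) hi ?heq]
  case heq =>
    intro k _ hk
    simp only [Function.comp, List.countP_map, List.countP_filter]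
    norm_cast
    rw [List.countP_congr (q := fun a => decide ((grid.getD k []).getD a 0 = 1) && decide (a = j))
      (by intro x _; simp [hk, and_comm])]
    rw [pvCountPRangeSingle]
    by_cases h1 : j < (grid.getD k []).length <;> by_cases h2 : (grid.getD k []).getD j 0 = 1 <;>
      simp [h1, h2]
  · simp only [Function.comp_apply, List.countP_map]
    have hzero : List.countP ((fun p : Nat × Nat => decide (p.1 ≠ i) && decide (p.2 = j)) ∘ fun j' => (i, j'))
        (List.filter (fun j' => decide ((grid.getD i []).getD j' 0 = 1))
          (List.range (grid.getD i []).length)) = 0 :=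
      List.countP_eq_zero.mpr (by intro a _; simp)
    rw [hzero]
    have hcol : ((List.range grid.length).map (fun k =>
        (((if j < (grid.getD k []).length ∧ (grid.getD k []).getD j 0 = 1 then 1 else 0 : Nat)) : Int))).sum
        = (pvCol grid j : Int) := by
      rw [pvCol]
      push_cast [List.map_map, Function.comp_def, apply_ite]
      rfl
    rw [hcol]
    simp only [hj, true_and]
    push_cast
    split_ifs <;> simp

def pvCell (grid : List (List Int)) (i j : Nat) : Int :=
  PySem.Int.mod ((grid.getD i []).getD j 0 + ((grid.getD i []).count 1 : Int) + (pvCol grid j : Int)) 2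

def pvClosed (grid : List (List Int)) : Int :=
  ((List.range grid.length).map (fun i =>
    ((List.range ((grid.getD i []).length)).map (fun j => pvCell grid i j)).sum)).sum

theorem pvFmodSub2 (a k : Int) : (a - 2 * k).fmod 2 = a.fmod 2 := by
  rw [Int.fmod_eq_emod, Int.fmod_eq_emod] <;> omega

theorem pvAclosed (grid : List (List Int)) (hpre : Pre_toggle_even grid) :
    toggle_even grid = pvClosed grid := by
  rw [pvAeq grid hpre, pvClosed]
  apply congrArg
  apply List.map_congr_left
  intro i hi
  apply congrArg
  apply List.map_congr_left
  intro j hj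
  have hi' := List.mem_range.mp hi
  have hj' := List.mem_range.mp hj
  rw [pvCnt1 grid i j hi' hj', pvCnt2 grid i j hi' hj', pvCell]
  show Int.fmod _ 2 = Int.fmod _ 2
  rw [(by unfold pvE; ring_nf : pvE grid i j +
      (((grid.getD i []).count 1 : Int) - (if (grid.getD i []).getD j 0 = 1 then 1 else 0)) +
      ((pvCol grid j : Int) - (if (grid.getD i []).getD j 0 = 1 then 1 else 0)) =
    ((grid.getD i []).getD j 0 + ((grid.getD i []).count 1 : Int) + (pvCol grid j : Int)) -
      2 * (if (grid.getD i []).getD j 0 = 1 then 1 else 0))]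
  exact pvFmodSub2 _ _

theorem pvEnumEqGen (row : List Int) (s : Int) :
    PySem.List.enumerate row s = (List.range row.length).map (fun k : Nat => (s + (k : Int), row.getD k 0)) := by
  induction row generalizing s with
  | nil => simp [PySem.List.enumerate_nil]
  | cons x xs ih =>
    rw [PySem.List.enumerate_cons, ih, List.length_cons, List.range_succ_eq_map]
    simp only [List.map_cons, List.map_map]
    refine List.cons_eq_cons.mpr ⟨by simp, ?_⟩
    apply List.map_congr_left
    intro k _
    simp only [Function.comp_apply, List.getD_cons_succ, Prod.mk.injEq]
    constructor
    · push_cast; ring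
    · trivial

theorem pvEnumEq (row : List Int) :
    PySem.List.enumerate row 0 = (List.range row.length).map (fun k : Nat => ((k : Int), row.getD k 0)) := by
  rw [pvEnumEqGen]
  apply List.map_congr_left
  intro k _
  simp

theorem pvDictInner (L : List (Int × Int)) (d : PySem.Dict Int Int) :
    L.foldl (fun d2 jv => if jv.2 = 1 then d2.modify jv.1 0 (· + 1) else d2) d =
      ((L.filter (fun jv => jv.2 = 1)).map (·.1)).foldl (fun d x => d.modify x 0 (· + 1)) d := by
  induction L generalizing d with
  | nil => rfl
  | cons a L ih =>
    rw [List.foldl_cons, ih, List.filter_cons]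
    by_cases h : a.2 = 1
    · rw [if_pos h, if_pos (by simpa using h), List.map_cons, List.foldl_cons]
    · rw [if_neg h, if_neg (by simpa using h)]

theorem pvFoldlFlatMap {α β : Type} (blk : α → List β) (step : PySem.Dict Int Int → β → PySem.Dict Int Int)
    (l : List α) (d : PySem.Dict Int Int) :
    l.foldl (fun d r => (blk r).foldl step d) d = (l.flatMap blk).foldl step d := by
  induction l generalizing d with
  | nil => rfl
  | cons a l ih => rw [List.foldl_cons, List.flatMap_cons, List.foldl_append, ih]

theorem pvColOnes (grid : List (List Int)) (k : Nat) :
    (grid.foldl (fun d row =>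
      (PySem.List.enumerate row).foldl (fun d2 jv =>
        if jv.2 = 1 then d2.modify jv.1 0 (· + 1) else d2) d) PySem.Dict.empty).getD (k : Int) 0 =
      (pvCol grid k : Int) := by
  have h1 : ∀ (row : List Int) (d : PySem.Dict Int Int),
      (PySem.List.enumerate row).foldl (fun d2 jv =>
        if jv.2 = 1 then d2.modify jv.1 0 (· + 1) else d2) d =
      ((((PySem.List.enumerate row).filter (fun jv => jv.2 = 1)).map (·.1))).foldl
        (fun d x => d.modify x 0 (· + 1)) d := fun row d => pvDictInner _ d
  simp only [h1]
  rw [pvFoldlFlatMap (fun row : List Int => (((PySem.List.enumerate row).filter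
    (fun jv => decide (jv.2 = 1))).map (fun x => x.1))) (fun d x => d.modify x 0 (· + 1)) grid
    PySem.Dict.empty]
  rw [PySem.Dict.getD_foldl_modify_add_one]
  rw [(by simp : (PySem.Dict.empty : PySem.Dict Int Int).getD (k : Int) 0 = 0), zero_add]
  rw [List.count_eq_countP, List.countP_flatMap]
  have h2 : ∀ row : List Int,
      (List.countP ((fun x => x == (k : Int)) ) (((PySem.List.enumerate row).filter (fun jv => jv.2 = 1)).map (·.1))) =
      (if k < row.length ∧ row.getD k 0 = 1 then 1 else 0) := by
    intro row
    simp only [List.countP_map, List.countP_filter, pvEnumEq, Function.comp_def]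
    have hcg := List.countP_congr (l := List.range row.length)
      (p := fun x : Nat => (((x : Int)) == (k : Int)) && decide (row.getD x 0 = 1))
      (q := fun x : Nat => decide (row.getD x 0 = 1) && decide (x = k))
      (by intro x _; simp [and_comm])
    rw [hcg, pvCountPRangeSingle]
    simp
  conv_lhs =>
    rw [(by apply List.map_congr_left; intro r _; rw [Function.comp_apply]; exact h2 r :
      grid.map ((List.countP fun x => x == (k : Int)) ∘ fun row =>
        (List.filter (fun jv => decide (jv.2 = 1)) (PySem.List.enumerate row)).map (fun x => x.1)) =
      grid.map (fun row => if k < row.length ∧ row.getD k 0 = 1 then 1 else 0))]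
  rw [pvCol]
  conv_lhs => rw [← pvMapRangeGetD ([] : List Int) grid, List.map_map]
  push_cast [List.map_map, Function.comp_def, apply_ite]
  rfl

theorem pvZipSelf {α β : Type} (l : List α) (f : α → β) :
    l.zip (l.map f) = l.map (fun x => (x, f x)) := by
  induction l with
  | nil => rfl
  | cons a l ih => simp [ih]

theorem pvMapSum {α : Type} (l : List α) (d : α) (F : α → Int) :
    l.map F = (List.range l.length).map (fun i => F (l.getD i d)) := by
  conv_lhs => rw [← pvMapRangeGetD d l, List.map_map]
  rfl

theorem pvBclosed (grid : List (List Int)) : toggle_even_alt grid = pvClosed grid := by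
  simp only [toggle_even_alt]
  rw [pvZipSelf, List.map_map, pvClosed, pvMapSum (l := grid) (d := ([] : List Int))]
  apply congrArg
  apply List.map_congr_left
  intro i _
  simp only [Function.comp_apply]
  rw [pvEnumEq, List.map_map]
  apply congrArg
  apply List.map_congr_left
  intro j _
  simp only [Function.comp_apply]
  rw [pvColOnes grid j, PySem.List.count_eq, pvCell]

-- ===== VERDICT (by name: the statement is the Claim_ definition above) =====
theorem toggle_even_spec : Claim_equal_toggle_even := by
  intro grid _ hpre
  show toggle_even grid = toggle_even_alt grid
  rw [pvAclosed grid hpre, pvBclosed grid]
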